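-- pv_equiv track=rewrite | github.com/jungwoo3490/Algorithm | Programmers/Level 1/과일 장수.py | solution
-- ===== SOURCE A (Python) =====
-- def solution(k, m, score):
--     answer = 0
--     score = sorted(score, reverse=True)
--     box = int(len(score) / m)
--     index = -1
--     for i in range(box):
--         index = index + m
--         answer = answer + (m * score[index])
--     return answer
-- ===== SOURCE B (Python) =====
-- def solution(k, m, score):
--     cnt = {}
--     for v in score:
--         cnt[v] = cnt.get(v, 0) + 1
--     take = (len(score) // m) * m
--     total = 0
--     p = 0
--     for v in sorted(cnt, reverse=True):
--         hi = min(p + cnt[v], take)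
--         if p < hi:
--             total += v * (hi // m - p // m)
--         p += cnt[v]
--     return m * total
-- ===== Notes on version B (the rewrite author's own statement) =====
-- stated objective: alternative
-- what changed: B never indexes into a fully sorted score list: it builds a dict of counts, sorts only the distinct values descending, and for each run of equal values adds v times an arithmetic count (hi//m - p//m) of the selected positions inside the run, instead of A's full descending sort plus one list-indexing per box.
-- outside the precondition, e.g. on solution(0, -2, [3, 1, 2]): A returns 0, B returns 8
import Mathlib
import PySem

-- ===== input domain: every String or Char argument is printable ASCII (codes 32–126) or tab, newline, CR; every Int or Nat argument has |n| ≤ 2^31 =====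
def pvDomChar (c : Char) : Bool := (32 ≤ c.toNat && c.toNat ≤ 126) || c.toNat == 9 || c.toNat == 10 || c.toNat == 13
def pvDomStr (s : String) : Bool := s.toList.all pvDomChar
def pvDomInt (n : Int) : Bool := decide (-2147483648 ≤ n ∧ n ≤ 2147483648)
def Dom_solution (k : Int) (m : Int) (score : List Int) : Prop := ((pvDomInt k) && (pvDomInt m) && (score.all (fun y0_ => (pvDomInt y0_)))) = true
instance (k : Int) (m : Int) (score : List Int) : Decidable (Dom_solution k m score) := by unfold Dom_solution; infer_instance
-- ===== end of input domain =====

-- B replaces A's full descending sort with a dict of counts whose distinct values are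
-- sorted once and walked run-by-run, counting selected positions per run arithmetically
-- (objective: alternative — no per-element indexing into a fully sorted list).


-- ===== PORT A =====
-- Literal port of A.  int(len(score)/m) is PySem.Int.truncdiv (exact here: |len|,|m| < 2^53).
-- score[index] is pyGetD (Python indexing): within Pre_ every index reached is in range,
-- so the default is never taken; m = 0 (ZeroDivisionError in Python) is outside Pre_.
def solution (k : Int) (m : Int) (score : List Int) : Int :=
  let answer : Int := 0
  let score := PySem.List.sorted score (fun x => x) true
  let box := PySem.Int.truncdiv (score.length : Int) m
  let index : Int := -1
  let st := (PySem.List.pyRange 0 box 1).foldl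
    (fun (p : Int × Int) _i =>
      let index := p.1 + m
      (index, p.2 + m * PySem.List.pyGetD score index 0)) (index, answer)
  st.2

-- ===== PORT B =====
-- Literal port of Source B: build a dict of counts, sort its keys descending, walk the runs
-- keeping (p, total); per run add v * (hi//m - p//m), the number of selected positions
-- (those ≡ m-1 mod m, below take) inside the run; finally multiply by m.
def solution_alt (k : Int) (m : Int) (score : List Int) : Int :=
  let cnt := score.foldl (fun d v => d.insert v (d.getD v 0 + 1)) (PySem.Dict.empty : PySem.Dict Int Int)
  let take := PySem.Int.floordiv (score.length : Int) m * m
  let st := (PySem.List.sorted cnt.keys (fun x => x) true).foldl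
    (fun (st : Int × Int) v =>
      let hi := min (st.1 + cnt.getD v 0) take
      (st.1 + cnt.getD v 0,
       if st.1 < hi then st.2 + v * (PySem.Int.floordiv hi m - PySem.Int.floordiv st.1 m) else st.2))
    (0, 0)
  m * st.2

-- ===== PRECONDITION & SPEC =====
-- Pre_ excludes nonpositive m, outside the task's natural domain (a box of m fruits):
-- m = 0 makes A raise ZeroDivisionError, and for m < 0 a box size is meaningless.
def Pre_solution (k : Int) (m : Int) (score : List Int) : Prop := 1 ≤ m
instance (k : Int) (m : Int) (score : List Int) : Decidable (Pre_solution k m score) := by unfold Pre_solution; infer_instance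
def pvWitness_solution : Int × Int × List Int := (4, 2, [4, 1, 2, 3, 1])

def Spec_solution (k : Int) (m : Int) (score : List Int) (out : Int) : Prop := out = solution_alt k m score
instance (k : Int) (m : Int) (score : List Int) (out : Int) : Decidable (Spec_solution k m score out) := by unfold Spec_solution; infer_instance

-- ===== CLAIM (what is proved, stated in full; the proofs are below) =====
def Claim_equal_solution : Prop := ∀ (k : Int) (m : Int) (score : List Int), Dom_solution k m score → Pre_solution k m score → Spec_solution k m score (solution k m score)

-- ===== LEMMAS AND PROOFS =====

-- the descending sorted list, written as the runs of its distinct values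
def runsOf (score : List Int) : List Int :=
  (PySem.List.sorted (PySem.Set.ofList score) (fun x => x) true).flatMap
    (fun v => List.replicate (score.count v) v)

-- per-run counts over a Nodup value list
lemma sum_count_runs (x : Int) (c : Int → Nat) :
    ∀ vs : List Int, vs.Nodup →
      (vs.map (fun v => (List.replicate (c v) v).count x)).sum = if x ∈ vs then c x else 0 := by
  intro vs
  induction vs with
  | nil => simp
  | cons v vs ih =>
    intro h
    rcases List.nodup_cons.mp h with ⟨hv, hnd⟩
    rw [List.map_cons, List.sum_cons, ih hnd, List.count_replicate]
    by_cases hx : v = x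
    · subst hx
      simp [hv]
    · have hxv : ¬ x = v := fun he => hx he.symm
      simp [hx, hxv]

-- count bookkeeping: each element's multiplicity is preserved by the runs
lemma runs_perm (score : List Int) : (runsOf score).Perm score := by
  apply (List.perm_iff_count).mpr
  intro x
  rw [runsOf, List.count_flatMap]
  have hnd : (PySem.List.sorted (PySem.Set.ofList score) (fun x => x) true).Nodup :=
    (PySem.List.sorted_perm _ _ true).nodup_iff.mpr (PySem.Set.nodup_ofList score)
  have hmem : x ∈ PySem.List.sorted (PySem.Set.ofList score) (fun x => x) true ↔ x ∈ score := by
    rw [PySem.List.mem_sorted, PySem.Set.mem_ofList]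
  have hcomp : (List.count x ∘ fun v => List.replicate (score.count v) v)
      = fun v => (List.replicate (score.count v) v).count x := rfl
  rw [hcomp, sum_count_runs x (fun v => score.count v) _ hnd]
  by_cases hx : x ∈ score
  · simp [hmem, hx]
  · simp [hmem, hx, List.count_eq_zero.mpr hx]

-- the runs are pairwise descending
lemma runs_pairwise (score : List Int) :
    (runsOf score).Pairwise (fun a b : Int => b ≤ a) := by
  rw [runsOf, List.flatMap_def, List.pairwise_flatten]
  constructor
  · intro l hl
    simp only [List.mem_map] at hl
    obtain ⟨v, _, rfl⟩ := hl
    exact List.pairwise_replicate.mpr (Or.inr le_rfl)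
  · rw [List.pairwise_map]
    refine (PySem.List.sorted_pairwise_rev (PySem.Set.ofList score) (fun x => x)).imp ?_
    intro a b hba x hx y hy
    rw [List.eq_of_mem_replicate hx, List.eq_of_mem_replicate hy]
    exact hba

-- sorted(score, reverse=True) IS the run decomposition
lemma sorted_rev_eq_runs (score : List Int) :
    PySem.List.sorted score (fun x => x) true = runsOf score := by
  refine List.Perm.eq_of_pairwise (le := fun a b : Int => b ≤ a)
    (fun a b _ _ h1 h2 => le_antisymm h2 h1)
    (PySem.List.sorted_pairwise_rev score (fun x => x))
    (runs_pairwise score)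
    ((PySem.List.sorted_perm score (fun x => x) true).trans (runs_perm score).symm)

-- A's for-loop unrolled: the running index after step j is -1+(j+1)*m, so the
-- accumulator is the sum of m * g(i0+(j+1)*m) over j < b
lemma loopA (g : Int → Int) (m : Int) (b : Nat) (i0 a0 : Int) :
    (PySem.List.pyRange 0 (b : Int) 1).foldl
      (fun (p : Int × Int) _i => (p.1 + m, p.2 + m * g (p.1 + m))) (i0, a0)
    = (i0 + b * m, a0 + ((List.range b).map (fun (j : Nat) => m * g (i0 + ((j : Int) + 1) * m))).sum) := by
  induction b with
  | zero => simp [PySem.List.pyRange_one_eq_nil]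
  | succ b ih =>
    rw [show ((b+1 : Nat) : Int) = (b : Int) + 1 by push_cast; ring,
        PySem.List.pyRange_one_succ_right (by positivity), List.foldl_append, ih]
    simp [List.range_succ]
    constructor
    · ring
    · rw [show i0 + (b : Int) * m + m = i0 + ((b : Int) + 1) * m by ring]; ring

-- how many selected positions (those j with p ≤ j*m+m-1 < hi) there are: hi//m - p//m
lemma card_sel (m p hi : Int) (hm : 1 ≤ m) (hp : 0 ≤ p) (box : Nat) (hhi : hi ≤ (box : Int) * m) :
    ((Finset.range box).filter
      (fun i : Nat => p ≤ (i : Int) * m + m - 1 ∧ (i : Int) * m + m - 1 < hi)).card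
    = (PySem.Int.floordiv hi m - PySem.Int.floordiv p m).toNat := by
  have hm0 : 0 < m := hm
  set a := PySem.Int.floordiv p m with ha
  set b := PySem.Int.floordiv hi m with hb
  have ha0 : 0 ≤ a := by
    rw [ha, PySem.Int.floordiv_eq_ediv_of_pos hm0]
    exact Int.ediv_nonneg hp (le_of_lt hm0)
  have hbbox : b < (box : Int) + 1 := by
    rw [hb, PySem.Int.floordiv_lt_iff_lt_mul hm0]
    nlinarith
  have hcond : ∀ i : Nat,
      ((p ≤ (i : Int) * m + m - 1 ∧ (i : Int) * m + m - 1 < hi) ↔ (a ≤ (i : Int) ∧ (i : Int) < b)) := by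
    intro i
    have h1 : p ≤ (i : Int) * m + m - 1 ↔ a < (i : Int) + 1 := by
      rw [ha, PySem.Int.floordiv_lt_iff_lt_mul hm0]
      constructor <;> intro h <;> nlinarith
    have h2 : (i : Int) * m + m - 1 < hi ↔ (i : Int) + 1 ≤ b := by
      rw [hb, PySem.Int.le_floordiv_iff_mul_le hm0]
      constructor <;> intro h <;> nlinarith
    rw [h1, h2]
    omega
  have hset : ((Finset.range box).filter
      (fun i : Nat => p ≤ (i : Int) * m + m - 1 ∧ (i : Int) * m + m - 1 < hi))
      = Finset.Ico a.toNat b.toNat := by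
    ext i
    simp only [Finset.mem_filter, Finset.mem_range, Finset.mem_Ico]
    rw [hcond i]
    omega
  rw [hset, Nat.card_Ico]
  omega

-- inside a run the sorted list is constant
lemma getD_run (pre rest : List Int) (v : Int) (c : Nat) (idx : Int)
    (h0 : (pre.length : Int) ≤ idx) (h1 : idx < (pre.length : Int) + c) :
    PySem.List.pyGetD (pre ++ (List.replicate c v ++ rest)) idx 0 = v := by
  have h0' : 0 ≤ idx := le_trans (Int.natCast_nonneg _) h0
  have hlen : ((pre ++ (List.replicate c v ++ rest)).length : Int)
      = (pre.length : Int) + c + rest.length := by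
    simp only [List.length_append, List.length_replicate]
    push_cast; ring
  rw [PySem.List.pyGetD_eq_getElem _ 0 h0' (by rw [hlen]; omega)]
  rw [List.getElem_append_right (by omega)]
  rw [List.getElem_append_left (by simp only [List.length_replicate]; omega)]
  exact List.getElem_replicate _

-- B's loop over the remaining runs, from position p: it ends at the full length and
-- adds the value at every selected position ≥ p
lemma foldB (m : Int) (hm : 1 ≤ m) (s : List Int) (take : Int) (box : Nat)
    (htake : take ≤ (s.length : Int)) (hbox : take = (box : Int) * m)
    (c : Int → Nat) :
    ∀ (vs : List Int) (pre : List Int) (t : Int),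
    s = pre ++ vs.flatMap (fun v => List.replicate (c v) v) →
    vs.foldl (fun (st : Int × Int) v =>
        let hi := min (st.1 + (c v : Int)) take
        (st.1 + (c v : Int),
         if st.1 < hi then st.2 + v * (PySem.Int.floordiv hi m - PySem.Int.floordiv st.1 m) else st.2))
      ((pre.length : Int), t)
    = ((s.length : Int),
       t + Finset.sum ((Finset.range box).filter (fun i : Nat => (pre.length : Int) ≤ (i : Int) * m + m - 1))
             (fun i : Nat => PySem.List.pyGetD s ((i : Int) * m + m - 1) 0)) := by
  have hm0 : 0 < m := hm
  intro vs
  induction vs with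
  | nil =>
    intro pre t hs
    simp only [List.flatMap_nil, List.append_nil] at hs
    have htake' : take ≤ (pre.length : Int) := by rw [← hs]; exact htake
    rw [hs]
    simp only [List.foldl_nil]
    have hempty : ((Finset.range box).filter
        (fun i : Nat => (pre.length : Int) ≤ (i : Int) * m + m - 1)) = ∅ := by
      rw [Finset.filter_eq_empty_iff]
      intro i hi
      simp only [Finset.mem_range] at hi
      have hib : (i : Int) + 1 ≤ (box : Int) := by exact_mod_cast hi
      have h1 : ((i : Int) + 1) * m ≤ (box : Int) * m :=
        mul_le_mul_of_nonneg_right hib (le_of_lt hm0)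
      intro hcon
      nlinarith [htake']
    rw [hempty]
    simp
  | cons v vs ih =>
    intro pre t hs
    rw [List.flatMap_cons] at hs
    have hs' : s = (pre ++ List.replicate (c v) v) ++ vs.flatMap (fun v => List.replicate (c v) v) := by
      rw [hs, List.append_assoc]
    simp only [List.foldl_cons]
    set p : Int := (pre.length : Int) with hp_def
    have hp0 : 0 ≤ p := Int.natCast_nonneg _
    have hcv0 : (0 : Int) ≤ (c v : Int) := Int.natCast_nonneg _
    set hi : Int := min (p + (c v : Int)) take with hhi_def
    have hhitake : hi ≤ take := min_le_right _ _
    have hhicv : hi ≤ p + (c v : Int) := min_le_left _ _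
    set t' : Int := if p < hi then t + v * (PySem.Int.floordiv hi m - PySem.Int.floordiv p m) else t with ht'
    have hlen2 : ((pre ++ List.replicate (c v) v).length : Int) = p + (c v : Int) := by
      simp only [List.length_append, List.length_replicate, hp_def]; push_cast; ring
    have hIH := ih (pre ++ List.replicate (c v) v) t' hs'
    rw [hlen2] at hIH
    rw [hIH]
    -- split the selected positions ≥ p into those inside this run and those after it
    have hsplit := Finset.sum_filter_add_sum_filter_not
      ((Finset.range box).filter (fun i : Nat => p ≤ (i : Int) * m + m - 1))
      (fun i : Nat => (i : Int) * m + m - 1 < p + (c v : Int))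
      (fun i : Nat => PySem.List.pyGetD s ((i : Int) * m + m - 1) 0)
    rw [Finset.filter_filter, Finset.filter_filter] at hsplit
    have htail : ((Finset.range box).filter
          (fun i : Nat => p ≤ (i : Int) * m + m - 1 ∧ ¬ (i : Int) * m + m - 1 < p + (c v : Int)))
        = (Finset.range box).filter (fun i : Nat => p + (c v : Int) ≤ (i : Int) * m + m - 1) := by
      apply Finset.filter_congr
      intro i _
      constructor
      · rintro ⟨h1, h2⟩
        omega
      · intro h1
        exact ⟨by omega, by omega⟩
    rw [htail] at hsplit
    -- every i < box has its selected position below take, so the run cap is hi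
    have hidxlt : ∀ i : Nat, i < box → (i : Int) * m + m - 1 < take := by
      intro i hi2
      have hib : (i : Int) + 1 ≤ (box : Int) := by exact_mod_cast hi2
      have h1 : ((i : Int) + 1) * m ≤ (box : Int) * m :=
        mul_le_mul_of_nonneg_right hib (le_of_lt hm0)
      rw [hbox]
      nlinarith
    have hmid : ((Finset.range box).filter
          (fun i : Nat => p ≤ (i : Int) * m + m - 1 ∧ (i : Int) * m + m - 1 < p + (c v : Int)))
        = (Finset.range box).filter
          (fun i : Nat => p ≤ (i : Int) * m + m - 1 ∧ (i : Int) * m + m - 1 < hi) := by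
      apply Finset.filter_congr
      intro i hi2
      simp only [Finset.mem_range] at hi2
      have := hidxlt i hi2
      constructor
      · rintro ⟨h1, h2⟩
        exact ⟨h1, by omega⟩
      · rintro ⟨h1, h2⟩
        exact ⟨h1, by omega⟩
    rw [hmid] at hsplit
    -- inside the run all selected positions hold v
    have hconst : ∀ i ∈ (Finset.range box).filter
        (fun i : Nat => p ≤ (i : Int) * m + m - 1 ∧ (i : Int) * m + m - 1 < hi),
        PySem.List.pyGetD s ((i : Int) * m + m - 1) 0 = v := by
      intro i hmem
      simp only [Finset.mem_filter, Finset.mem_range] at hmem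
      rw [hs]
      exact getD_run pre _ v (c v) ((i : Int) * m + m - 1) hmem.2.1 (by omega)
    have hmidsum : Finset.sum ((Finset.range box).filter
          (fun i : Nat => p ≤ (i : Int) * m + m - 1 ∧ (i : Int) * m + m - 1 < hi))
          (fun i : Nat => PySem.List.pyGetD s ((i : Int) * m + m - 1) 0)
        = t' - t := by
      rw [Finset.sum_congr rfl hconst, Finset.sum_const]
      rw [card_sel m p hi hm hp0 box (le_of_le_of_eq hhitake hbox)]
      by_cases hph : p < hi
      · have hmono : PySem.Int.floordiv p m ≤ PySem.Int.floordiv hi m := by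
          rw [PySem.Int.floordiv_eq_ediv_of_pos hm0, PySem.Int.floordiv_eq_ediv_of_pos hm0]
          exact Int.ediv_le_ediv hm0 (le_of_lt hph)
        rw [ht']
        simp only [hph, if_true]
        rw [nsmul_eq_mul]
        have hcast : ((PySem.Int.floordiv hi m - PySem.Int.floordiv p m).toNat : Int)
            = PySem.Int.floordiv hi m - PySem.Int.floordiv p m := by omega
        rw [hcast]
        ring
      · have hhp : hi ≤ p := by omega
        have hz : (PySem.Int.floordiv hi m - PySem.Int.floordiv p m).toNat = 0 := by
          have hmono : PySem.Int.floordiv hi m ≤ PySem.Int.floordiv p m := by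
            rw [PySem.Int.floordiv_eq_ediv_of_pos hm0, PySem.Int.floordiv_eq_ediv_of_pos hm0]
            exact Int.ediv_le_ediv hm0 hhp
          omega
        rw [hz, ht']
        simp [hph]
    simp only [Prod.mk.injEq]
    refine ⟨by trivial, by omega⟩

-- A = B for every m ≥ 1
theorem main_eq (k m : Int) (score : List Int) (hm : 1 ≤ m) :
    solution k m score = solution_alt k m score := by
  have hm0 : 0 < m := hm
  simp only [solution, solution_alt]
  set s := PySem.List.sorted score (fun x => x) true with hs_def
  have hslen : (s.length : Int) = (score.length : Int) := by
    rw [hs_def, PySem.List.length_sorted]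
  set n : Int := (score.length : Int) with hn_def
  have hn0 : 0 ≤ n := Int.natCast_nonneg _
  have hq0 : 0 ≤ n / m := Int.ediv_nonneg hn0 (le_of_lt hm0)
  set box : Nat := (n / m).toNat with hbox_def
  have hbq : (box : Int) = n / m := Int.toNat_of_nonneg hq0
  -- A's box: int(len/m) is the floor quotient here (nonnegative numerator)
  have htd : PySem.Int.truncdiv ((s.length : Int)) m = (box : Int) := by
    rw [show PySem.Int.truncdiv = Int.tdiv from rfl, hslen,
        Int.tdiv_eq_ediv_of_nonneg hn0, hbq]
  -- B's take
  have hfd : PySem.Int.floordiv n m = (box : Int) := by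
    rw [PySem.Int.floordiv_eq_ediv_of_pos hm0, hbq]
  have htake_le : (box : Int) * m ≤ (s.length : Int) := by
    rw [hslen, hbq]
    have h1 := Int.emod_nonneg n (ne_of_gt hm0)
    have h2 := Int.mul_ediv_add_emod n m
    nlinarith
  -- evaluate A's loop
  rw [htd]
  have hA := congrArg Prod.snd (loopA (fun t => PySem.List.pyGetD s t 0) m box (-1) 0)
  simp only at hA
  rw [hA]
  -- B: the dict of counts is the counter
  have hgetD : ∀ v : Int,
      (score.foldl (fun d v => d.insert v (d.getD v 0 + 1)) (PySem.Dict.empty : PySem.Dict Int Int)).getD v 0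
        = ((score.count v : Nat) : Int) := by
    intro v
    rw [PySem.Dict.getD_foldl_insert_add_one, PySem.Dict.getD_empty]
    ring
  have hkeys :
      (score.foldl (fun d v => d.insert v (d.getD v 0 + 1)) (PySem.Dict.empty : PySem.Dict Int Int)).keys
        = PySem.Set.ofList score := by
    rw [PySem.Dict.foldl_insert_getD_add_one_eq_counter, PySem.Dict.keys_counter]
  rw [hkeys]
  -- replace dict lookups by counts in B's loop body
  have hfun : (fun (st : Int × Int) (v : Int) =>
        (st.1 + (score.foldl (fun d v => d.insert v (d.getD v 0 + 1)) (PySem.Dict.empty : PySem.Dict Int Int)).getD v 0,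
         if st.1 < min (st.1 + (score.foldl (fun d v => d.insert v (d.getD v 0 + 1)) (PySem.Dict.empty : PySem.Dict Int Int)).getD v 0) (PySem.Int.floordiv n m * m)
         then st.2 + v * (PySem.Int.floordiv (min (st.1 + (score.foldl (fun d v => d.insert v (d.getD v 0 + 1)) (PySem.Dict.empty : PySem.Dict Int Int)).getD v 0) (PySem.Int.floordiv n m * m)) m - PySem.Int.floordiv st.1 m)
         else st.2))
      = (fun (st : Int × Int) (v : Int) =>
        (st.1 + ((score.count v : Nat) : Int),
         if st.1 < min (st.1 + ((score.count v : Nat) : Int)) ((box : Int) * m)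
         then st.2 + v * (PySem.Int.floordiv (min (st.1 + ((score.count v : Nat) : Int)) ((box : Int) * m)) m - PySem.Int.floordiv st.1 m)
         else st.2)) := by
    funext st v
    rw [hgetD v, hfd]
  rw [hfun]
  -- B's loop over the runs of s, starting from the empty prefix
  have hruns : s = ([] : List Int) ++ (PySem.List.sorted (PySem.Set.ofList score) (fun x => x) true).flatMap
      (fun v => List.replicate (score.count v) v) := by
    rw [List.nil_append, hs_def, ← runsOf, sorted_rev_eq_runs]
  have hB := foldB m hm s ((box : Int) * m) box htake_le rfl (fun v => score.count v)
    (PySem.List.sorted (PySem.Set.ofList score) (fun x => x) true) [] 0 hruns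
  have hB2 := congrArg Prod.snd hB
  simp only [List.length_nil, Nat.cast_zero] at hB2
  rw [hB2]
  -- all selected positions are ≥ 0: the filter keeps everything
  have hfull : ((Finset.range box).filter (fun i : Nat => (0 : Int) ≤ (i : Int) * m + m - 1))
      = Finset.range box := by
    apply Finset.filter_true_of_mem
    intro i _
    have : (0 : Int) ≤ (i : Int) * m := mul_nonneg (Int.natCast_nonneg _) (le_of_lt hm0)
    omega
  rw [hfull]
  -- A's list-sum is the same Finset sum with the index rewritten
  have hL : ∀ (f : Nat → Int) (b : Nat), ((List.range b).map f).sum = Finset.sum (Finset.range b) f :=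
    fun f b => rfl
  rw [hL]
  simp only [zero_add]
  have harg : ∀ j : Nat, (-1 : Int) + ((j : Int) + 1) * m = (j : Int) * m + m - 1 := by
    intro j
    ring
  rw [Finset.mul_sum]
  refine Finset.sum_congr rfl ?_
  intro j _
  rw [harg j]

-- ===== VERDICT (by name: the statement is the Claim_ definition above) =====
theorem solution_spec : Claim_equal_solution := by
  intro k m score _ hm
  unfold Spec_solution
  exact main_eq k m score hm
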